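-- pv_equiv track=rewrite | github.com/cesarac666/loterias | backend/pipeline_filters.py | generate_nah_variations
-- ===== SOURCE A (Python) =====
-- from typing import Dict, Iterable, List, Sequence, Tuple, Optional
--
-- def generate_nah_variations(base: Tuple[int, int, int], var_range: int = 2) -> List[Tuple[int, int, int]]:
--     bN, bA, bH = base
--     combos = set()
--     for dN in range(-var_range, var_range + 1):
--         for dA in range(-var_range, var_range + 1):
--             for dH in range(-var_range, var_range + 1):
--                 n, a, h = bN + dN, bA + dA, bH + dH
--                 if n < 0 or a < 0 or h < 0:
--                     continue
--                 if n + a + h != 15: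
--                     continue
--                 combos.add((n, a, h))
--     return sorted(list(combos))
-- ===== SOURCE B (Python) =====
-- def generate_nah_variations(base, var_range=2):
--     # O(r^2): the third component is determined by h = 15 - n - a, so the inner
--     # loop, the set, and the final sort all disappear (the two-loop scan emits
--     # each valid triple exactly once in lexicographic order).
--     bN, bA, bH = base
--     out = []
--     for dN in range(-var_range, var_range + 1):
--         for dA in range(-var_range, var_range + 1):
--             n, a = bN + dN, bA + dA
--             h = 15 - n - a
--             if n >= 0 and a >= 0 and h >= 0 and bH - var_range <= h <= bH + var_range:
--                 out.append((n, a, h))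
--     return out
-- ===== Notes on version B (the rewrite author's own statement) =====
-- stated objective: faster
-- what changed: The inner loop over dH is eliminated by solving h = 15 - n - a and checking that h lies in [bH-var_range, bH+var_range]; the set and the final sort are dropped because the two-loop scan emits each valid triple exactly once in lexicographic order.
import Mathlib
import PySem

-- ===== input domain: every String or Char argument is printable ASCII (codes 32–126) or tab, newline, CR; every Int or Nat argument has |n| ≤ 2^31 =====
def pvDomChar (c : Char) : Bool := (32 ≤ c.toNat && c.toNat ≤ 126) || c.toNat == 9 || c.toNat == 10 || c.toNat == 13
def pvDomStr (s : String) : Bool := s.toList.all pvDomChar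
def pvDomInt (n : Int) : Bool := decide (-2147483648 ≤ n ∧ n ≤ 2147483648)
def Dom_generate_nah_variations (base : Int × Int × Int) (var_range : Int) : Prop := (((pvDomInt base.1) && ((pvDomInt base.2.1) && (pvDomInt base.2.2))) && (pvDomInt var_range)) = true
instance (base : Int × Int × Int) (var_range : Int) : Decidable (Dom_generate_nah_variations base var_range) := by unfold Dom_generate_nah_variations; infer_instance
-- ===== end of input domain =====

-- B is an O(r^2) re-implementation: the inner dH loop, the set and the final sort of A
-- are replaced by solving h = 15 - n - a and a bounds check, emitting triples directly
-- in lexicographic order.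

-- ===== PORT A =====
-- Python compares tuples lexicographically; this key realises that order for triples.
def nahKey (x : Int × Int × Int) : Int ×ₗ (Int ×ₗ Int) := toLex (x.1, toLex (x.2.1, x.2.2))

def generate_nah_variations (base : Int × Int × Int) (var_range : Int) : List (Int × Int × Int) :=
  let bN := base.1
  let bA := base.2.1
  let bH := base.2.2
  let combos : PySem.Set (Int × Int × Int) :=
    (PySem.List.pyRange (-var_range) (var_range + 1)).foldl (fun s dN =>
      (PySem.List.pyRange (-var_range) (var_range + 1)).foldl (fun s dA =>
        (PySem.List.pyRange (-var_range) (var_range + 1)).foldl (fun s dH =>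
          let n := bN + dN
          let a := bA + dA
          let h := bH + dH
          if n < 0 ∨ a < 0 ∨ h < 0 then s
          else if n + a + h ≠ 15 then s
          else PySem.Set.add s (n, a, h)) s) s) PySem.Set.empty
  -- sorted(list(combos)): sorting the distinct elements by Python's tuple order
  PySem.List.sorted combos nahKey false

-- ===== PORT B =====
def generate_nah_variations_alt (base : Int × Int × Int) (var_range : Int) : List (Int × Int × Int) :=
  let bN := base.1
  let bA := base.2.1
  let bH := base.2.2
  (PySem.List.pyRange (-var_range) (var_range + 1)).foldl (fun out dN =>
    (PySem.List.pyRange (-var_range) (var_range + 1)).foldl (fun out dA =>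
      let n := bN + dN
      let a := bA + dA
      let h := 15 - n - a
      if 0 ≤ n ∧ 0 ≤ a ∧ 0 ≤ h ∧ bH - var_range ≤ h ∧ h ≤ bH + var_range
      then out ++ [(n, a, h)] else out) out) []

-- ===== PRECONDITION & SPEC =====
def Spec_generate_nah_variations (base : Int × Int × Int) (var_range : Int) (out : List (Int × Int × Int)) : Prop := out = generate_nah_variations_alt base var_range
instance (base : Int × Int × Int) (var_range : Int) (out : List (Int × Int × Int)) : Decidable (Spec_generate_nah_variations base var_range out) := by unfold Spec_generate_nah_variations; infer_instance

-- ===== CLAIM (what is proved, stated in full; the proofs are below) =====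
def Claim_equal_generate_nah_variations : Prop := ∀ (base : Int × Int × Int) (var_range : Int), Dom_generate_nah_variations base var_range → Spec_generate_nah_variations base var_range (generate_nah_variations base var_range)

-- ===== LEMMAS AND PROOFS =====

-- Membership in a fold of set-updates, one generic level.
theorem mem_foldl_step {α β : Type} [BEq β] (l : List α)
    (step : PySem.Set β → α → PySem.Set β) (Q : α → β → Prop)
    (h : ∀ s d, d ∈ l → ∀ x, x ∈ step s d ↔ x ∈ s ∨ Q d x) :
    ∀ (s0 : PySem.Set β) (x : β), x ∈ l.foldl step s0 ↔ x ∈ s0 ∨ ∃ d ∈ l, Q d x := by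
  induction l with
  | nil => simp
  | cons d t ih =>
    intro s0 x
    simp only [List.foldl_cons]
    rw [ih (fun s d hd => h s d (List.mem_cons_of_mem _ hd)),
        h s0 d (List.mem_cons_self) x]
    simp only [List.mem_cons]
    constructor
    · rintro ((hx | hq) | ⟨e, he, hq⟩)
      · exact Or.inl hx
      · exact Or.inr ⟨d, Or.inl rfl, hq⟩
      · exact Or.inr ⟨e, Or.inr he, hq⟩
    · rintro (hx | ⟨e, (rfl | he), hq⟩)
      · exact Or.inl (Or.inl hx)
      · exact Or.inl (Or.inr hq)
      · exact Or.inr ⟨e, he, hq⟩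

-- A fold of nodup-preserving steps preserves Nodup.
theorem nodup_foldl_step {α β : Type} (l : List α)
    (step : PySem.Set β → α → PySem.Set β)
    (h : ∀ s d, s.Nodup → (step s d).Nodup) :
    ∀ (s0 : PySem.Set β), s0.Nodup → (l.foldl step s0).Nodup := by
  induction l with
  | nil => intro s0 hs; simpa using hs
  | cons d t ih => intro s0 hs; exact ih _ (h s0 d hs)

-- Membership in A's set of combos.
theorem mem_combosA (bN bA bH v : Int) (x : Int × Int × Int) :
    (x ∈ (PySem.List.pyRange (-v) (v + 1)).foldl (fun s dN =>
      (PySem.List.pyRange (-v) (v + 1)).foldl (fun s dA =>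
        (PySem.List.pyRange (-v) (v + 1)).foldl (fun s dH =>
          if bN + dN < 0 ∨ bA + dA < 0 ∨ bH + dH < 0 then s
          else if bN + dN + (bA + dA) + (bH + dH) ≠ 15 then s
          else PySem.Set.add s (bN + dN, bA + dA, bH + dH)) s) s) PySem.Set.empty)
    ↔ ∃ dN ∈ PySem.List.pyRange (-v) (v + 1), ∃ dA ∈ PySem.List.pyRange (-v) (v + 1),
        ∃ dH ∈ PySem.List.pyRange (-v) (v + 1),
        (¬(bN + dN < 0 ∨ bA + dA < 0 ∨ bH + dH < 0) ∧ bN + dN + (bA + dA) + (bH + dH) = 15)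
        ∧ x = (bN + dN, bA + dA, bH + dH) := by
  rw [mem_foldl_step _ _
    (fun dN x => ∃ dA ∈ PySem.List.pyRange (-v) (v + 1), ∃ dH ∈ PySem.List.pyRange (-v) (v + 1),
      (¬(bN + dN < 0 ∨ bA + dA < 0 ∨ bH + dH < 0) ∧ bN + dN + (bA + dA) + (bH + dH) = 15)
      ∧ x = (bN + dN, bA + dA, bH + dH)) ?_ PySem.Set.empty x]
  · simp [PySem.Set.empty]
  intro s dN _ y
  rw [mem_foldl_step _ _
    (fun dA y => ∃ dH ∈ PySem.List.pyRange (-v) (v + 1),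
      (¬(bN + dN < 0 ∨ bA + dA < 0 ∨ bH + dH < 0) ∧ bN + dN + (bA + dA) + (bH + dH) = 15)
      ∧ y = (bN + dN, bA + dA, bH + dH)) ?_ s y]
  intro s dA _ y
  rw [mem_foldl_step _ _
    (fun dH y =>
      (¬(bN + dN < 0 ∨ bA + dA < 0 ∨ bH + dH < 0) ∧ bN + dN + (bA + dA) + (bH + dH) = 15)
      ∧ y = (bN + dN, bA + dA, bH + dH)) ?_ s y]
  intro s dH _ y
  by_cases h1 : bN + dN < 0 ∨ bA + dA < 0 ∨ bH + dH < 0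
  · simp [h1]
  by_cases h2 : bN + dN + (bA + dA) + (bH + dH) = 15
  · simp [h1, h2, PySem.Set.mem_add]
  · simp [h1, h2]

-- A's set of combos has no duplicates.
theorem nodup_combosA (bN bA bH v : Int) :
    ((PySem.List.pyRange (-v) (v + 1)).foldl (fun s dN =>
      (PySem.List.pyRange (-v) (v + 1)).foldl (fun s dA =>
        (PySem.List.pyRange (-v) (v + 1)).foldl (fun s dH =>
          if bN + dN < 0 ∨ bA + dA < 0 ∨ bH + dH < 0 then s
          else if bN + dN + (bA + dA) + (bH + dH) ≠ 15 then s
          else PySem.Set.add s (bN + dN, bA + dA, bH + dH)) s) s)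
      (PySem.Set.empty : PySem.Set (Int × Int × Int))).Nodup := by
  apply nodup_foldl_step
  · intro s dN hs
    apply nodup_foldl_step
    · intro s dA hs
      apply nodup_foldl_step
      · intro s dH hs
        split_ifs with h1 h2
        · exact hs
        · exact hs
        · exact PySem.Set.nodup_add _ _ hs
      · exact hs
    · exact hs
  · simp [PySem.Set.empty]

-- B's list written as a flatMap of maps of filters.
theorem altB_eq_flatMap (bN bA bH v : Int) :
    generate_nah_variations_alt (bN, bA, bH) v =
      (PySem.List.pyRange (-v) (v + 1)).flatMap (fun dN =>
        ((PySem.List.pyRange (-v) (v + 1)).filter (fun dA =>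
          decide (0 ≤ bN + dN ∧ 0 ≤ bA + dA ∧ 0 ≤ 15 - (bN + dN) - (bA + dA) ∧
            bH - v ≤ 15 - (bN + dN) - (bA + dA) ∧ 15 - (bN + dN) - (bA + dA) ≤ bH + v))).map
          (fun dA => (bN + dN, bA + dA, 15 - (bN + dN) - (bA + dA)))) := by
  unfold generate_nah_variations_alt
  simp only []
  rw [PySem.List.foldl_congr_mem' (g := fun out dN => out ++
        ((PySem.List.pyRange (-v) (v + 1)).filter (fun dA =>
          decide (0 ≤ bN + dN ∧ 0 ≤ bA + dA ∧ 0 ≤ 15 - (bN + dN) - (bA + dA) ∧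
            bH - v ≤ 15 - (bN + dN) - (bA + dA) ∧ 15 - (bN + dN) - (bA + dA) ≤ bH + v))).map
          (fun dA => (bN + dN, bA + dA, 15 - (bN + dN) - (bA + dA))))]
  · rw [PySem.List.foldl_append_eq_flatMap]
    simp
  · intro dN _ out
    exact PySem.List.foldl_append_ite _ _ _ _

-- The key order between two triples, spelled out.
theorem nahKey_lt_iff (n1 a1 h1 n2 a2 h2 : Int) :
    nahKey (n1, a1, h1) < nahKey (n2, a2, h2) ↔
      n1 < n2 ∨ (n1 = n2 ∧ (a1 < a2 ∨ (a1 = a2 ∧ h1 < h2))) := by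
  simp [nahKey, Prod.Lex.toLex_lt_toLex]

-- B's list is strictly increasing under the lexicographic key.
theorem pairwise_altB (bN bA bH v : Int) :
    (generate_nah_variations_alt (bN, bA, bH) v).Pairwise
      (fun p q => nahKey p < nahKey q) := by
  rw [altB_eq_flatMap]
  rw [List.pairwise_flatMap]
  constructor
  · intro dN _
    rw [List.pairwise_map]
    apply List.Pairwise.filter
    apply (PySem.List.pairwise_lt_pyRange_one (-v) (v + 1)).imp
    intro a b hab
    rw [nahKey_lt_iff]
    omega
  · apply (PySem.List.pairwise_lt_pyRange_one (-v) (v + 1)).imp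
    intro d1 d2 h12 x hx y hy
    simp only [List.mem_map, List.mem_filter] at hx hy
    obtain ⟨a1, _, rfl⟩ := hx
    obtain ⟨a2, _, rfl⟩ := hy
    rw [nahKey_lt_iff]
    omega

theorem nodup_altB (bN bA bH v : Int) :
    (generate_nah_variations_alt (bN, bA, bH) v).Nodup := by
  apply List.Pairwise.imp ?_ (pairwise_altB bN bA bH v)
  intro p q hlt rfl_eq
  subst rfl_eq
  exact lt_irrefl _ hlt

-- Same members: a triple is emitted by B iff it lands in A's set.
theorem mem_altB_iff (bN bA bH v : Int) (x : Int × Int × Int) :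
    x ∈ generate_nah_variations_alt (bN, bA, bH) v
    ↔ ∃ dN ∈ PySem.List.pyRange (-v) (v + 1), ∃ dA ∈ PySem.List.pyRange (-v) (v + 1),
        ∃ dH ∈ PySem.List.pyRange (-v) (v + 1),
        (¬(bN + dN < 0 ∨ bA + dA < 0 ∨ bH + dH < 0) ∧ bN + dN + (bA + dA) + (bH + dH) = 15)
        ∧ x = (bN + dN, bA + dA, bH + dH) := by
  rw [altB_eq_flatMap]
  simp only [List.mem_flatMap, List.mem_map, List.mem_filter, PySem.List.mem_pyRange_one,
    decide_eq_true_eq]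
  constructor
  · rintro ⟨dN, hdN, dA, ⟨hdA, hc⟩, rfl⟩
    refine ⟨dN, hdN, dA, hdA, 15 - (bN + dN) - (bA + dA) - bH, by omega, by omega, ?_⟩
    have : bH + (15 - (bN + dN) - (bA + dA) - bH) = 15 - (bN + dN) - (bA + dA) := by omega
    rw [this]
  · rintro ⟨dN, hdN, dA, hdA, dH, hdH, ⟨hc, hsum⟩, rfl⟩
    refine ⟨dN, hdN, dA, ⟨hdA, by omega⟩, ?_⟩
    have : 15 - (bN + dN) - (bA + dA) = bH + dH := by omega
    rw [this]

-- ===== VERDICT (by name: the statement is the Claim_ definition above) =====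
theorem generate_nah_variations_spec : Claim_equal_generate_nah_variations := by
  intro base v _
  obtain ⟨bN, bA, bH⟩ := base
  show generate_nah_variations (bN, bA, bH) v = generate_nah_variations_alt (bN, bA, bH) v
  unfold generate_nah_variations
  simp only []
  apply PySem.List.sorted_eq_of_perm_of_pairwise_lt
  · rw [List.perm_ext_iff_of_nodup (nodup_altB bN bA bH v) (nodup_combosA bN bA bH v)]
    intro x
    rw [mem_altB_iff, mem_combosA]
  · exact pairwise_altB bN bA bH v
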